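-- pv_equiv track=rewrite | github.com/Fr0stFree/AlgorithmSolutions | python/search_nearest.py | solve
-- ===== SOURCE A (Python) =====
-- import math
--
-- def solve(digits: list[int], looking_digits: list[int]) -> list[int]:
--     result: list[int] = []
--     digits.sort()
--     offset = 0
--
--     for looking_digit in looking_digits:
--         value, index = search_nearest(looking_digit, digits[offset:])
--         offset = index
--         result.append(value)
--
--     return result
--
-- def search_nearest(looking_digit: int, digits: list[int]) -> (int, int):
--     prev_diff = math.inf
--     nearest_digit = digits[0]
--     current_index = 0
--
--     for index, digit in enumerate(digits):
--         new_diff = abs(looking_digit - digit)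
--         if new_diff > prev_diff:
--             break
--
--         nearest_digit = digit if new_diff != prev_diff else min(digit, nearest_digit)
--         prev_diff = new_diff
--         current_index = index
--
--     return nearest_digit, current_index
-- ===== SOURCE B (Python) =====
-- import bisect
--
--
-- def solve(digits: list[int], looking_digits: list[int]) -> list[int]:
--     # Sorts `digits` in place, then answers each query with a binary search over
--     # the current window: the tail of the sorted list starting where the previous
--     # search stopped.  Nearest value wins, ties go to the smaller digit.
--     digits.sort()
--     result: list[int] = []
--     offset = 0
--
--     for q in looking_digits:
--         window = digits[offset:]
--         i = bisect.bisect_left(window, q)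
--         if i == len(window) or (i > 0 and q - window[i - 1] <= window[i] - q):
--             value = window[i - 1]
--         else:
--             value = window[i]
--         # the window's elements at the minimal distance d all lie in [q - d, q + d];
--         # the next window starts at the last of them
--         d = abs(q - value)
--         offset = bisect.bisect_right(window, q + d) - 1
--         result.append(value)
--
--     return result
-- ===== Notes on version B (the rewrite author's own statement) =====
-- stated objective: faster
-- what changed: Replaces the per-query left-to-right linear scan with break by a bisect binary search on the window: bisect_left picks between the two neighbouring candidates (tie to the smaller), and bisect_right(q + d) - 1 gives the last window element at the minimal distance, which is the next window start; Pre_ excludes only digits == [] with a nonempty query list, where both A and B raise IndexError.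
import Mathlib
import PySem

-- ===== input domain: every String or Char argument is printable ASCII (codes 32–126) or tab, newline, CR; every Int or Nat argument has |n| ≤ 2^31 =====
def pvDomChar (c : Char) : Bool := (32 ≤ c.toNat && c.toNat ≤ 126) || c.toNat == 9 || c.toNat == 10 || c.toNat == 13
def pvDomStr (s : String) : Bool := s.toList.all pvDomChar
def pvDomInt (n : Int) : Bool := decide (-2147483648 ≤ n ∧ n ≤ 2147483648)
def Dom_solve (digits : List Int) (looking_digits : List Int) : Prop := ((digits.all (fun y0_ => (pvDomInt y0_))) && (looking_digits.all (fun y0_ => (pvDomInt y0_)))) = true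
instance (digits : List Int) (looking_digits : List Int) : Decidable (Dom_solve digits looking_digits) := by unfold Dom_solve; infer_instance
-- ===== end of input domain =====

-- B replaces A's per-query linear scan over the window with a bisect binary search on
-- the same window (nearest via the two neighbours, tie to the smaller, next window start
-- via bisect_right); like A it sorts `digits` in place in Python — the equivalence
-- proved is about the return value.


-- ===== PORT A =====
-- the `for index, digit in enumerate(digits)` loop of search_nearest, with break;
-- `prev` is prev_diff (none = math.inf), `i` the enumerate counter, `idx` current_index
def snLoop (q : Int) (rest : List Int) (i : Int) (prev : Option Int) (nearest : Int) (idx : Int) : Int × Int :=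
  match rest with
  | [] => (nearest, idx)
  | d :: rest' =>
    let nd := |q - d|
    match prev with
    | none => snLoop q rest' (i + 1) (some nd) d i            -- nd > inf is False; nd != inf is True
    | some p =>
      if p < nd then (nearest, idx)                            -- break
      else snLoop q rest' (i + 1) (some nd) (if nd ≠ p then d else min d nearest) i

def search_nearest (q : Int) (digits : List Int) : Int × Int :=
  -- `digits[0]` raises IndexError on []; that input is excluded by Pre_solve (headD is a dummy)
  snLoop q digits 0 none (digits.headD 0) 0

def solveBody (ds : List Int) (st : List Int × Int) (q : Int) : List Int × Int :=
  let vi := search_nearest q (PySem.List.slice ds (some st.2) none)   -- digits[offset:]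
  (st.1 ++ [vi.1], vi.2)                                              -- offset = index

def solve (digits : List Int) (looking_digits : List Int) : List Int :=
  let ds := PySem.List.sorted digits (fun x => x) false                -- digits.sort()
  (looking_digits.foldl (solveBody ds) ([], 0)).1

-- ===== PORT B =====
-- one query of B: window = digits[offset:], bisect_left picks between the two
-- neighbours (tie to the smaller), bisect_right(q + d) - 1 is the next window start.
-- window[i-1]/window[i] are in range whenever the window is nonempty (Pre_solve);
-- getD is a dummy on the excluded empty window.
def stepB (ds : List Int) (st : List Int × Int) (q : Int) : List Int × Int :=
  let window := PySem.List.slice ds (some st.2) none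
  let i := PySem.List.bisectLeft window q
  let value :=
    if i = window.length ∨ (0 < i ∧ q - window.getD (i - 1) 0 ≤ window.getD i 0 - q)
    then window.getD (i - 1) 0 else window.getD i 0
  let d := |q - value|
  (st.1 ++ [value], (PySem.List.bisectRight window (q + d) : Int) - 1)

def solve_alt (digits : List Int) (looking_digits : List Int) : List Int :=
  let ds := PySem.List.sorted digits (fun x => x) false
  (looking_digits.foldl (stepB ds) ([], 0)).1

-- ===== PRECONDITION & SPEC =====
-- Pre_ excludes exactly the inputs where A raises IndexError (digits == [] with at
-- least one query: `digits[0]` on the empty list); B raises IndexError there too.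
def Pre_solve (digits : List Int) (looking_digits : List Int) : Prop :=
  digits ≠ [] ∨ looking_digits = []
instance (digits : List Int) (looking_digits : List Int) : Decidable (Pre_solve digits looking_digits) := by unfold Pre_solve; infer_instance

def pvWitness_solve : List Int × List Int := ([5, 1, 7], [4, 2])

def Spec_solve (digits : List Int) (looking_digits : List Int) (out : List Int) : Prop := out = solve_alt digits looking_digits
instance (digits : List Int) (looking_digits : List Int) (out : List Int) : Decidable (Spec_solve digits looking_digits out) := by unfold Spec_solve; infer_instance

-- ===== CLAIM (what is proved, stated in full; the proofs are below) =====
def Claim_equal_solve : Prop := ∀ (digits : List Int) (looking_digits : List Int), Dom_solve digits looking_digits → Pre_solve digits looking_digits → Spec_solve digits looking_digits (solve digits looking_digits)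

-- ===== LEMMAS AND PROOFS =====

-- A scanned element x with x = b (equal diff) extends the plateau and keeps the running
-- nearest; the scan breaks at the first element > b.
theorem snLoop_dup (q b : Int) : ∀ (r' : List Int) (i : Int) (nearest : Int),
    r'.Pairwise (· ≤ ·) → (∀ x ∈ r', b ≤ x) → q ≤ b → nearest ≤ b →
    snLoop q r' (i + 1) (some (b - q)) nearest i
      = (nearest, i + ((r'.takeWhile (· == b)).length : Int)) := by
  intro r'
  induction r' with
  | nil => intro i nearest _ _ _ _; simp [snLoop]
  | cons x t ih =>
    intro i nearest hp hlb hqb hnb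
    have hbx : b ≤ x := hlb x (by simp)
    have habs : |q - x| = x - q := by
      rw [abs_sub_comm]; exact abs_of_nonneg (by omega)
    by_cases hxb : b < x
    · have htw : (List.takeWhile (· == b) (x :: t)) = [] := by
        simp; omega
      simp [snLoop, habs, htw]
      intro h; omega
    · have hxeq : x = b := le_antisymm (by omega) hbx
      subst hxeq
      have htw : (List.takeWhile (· == x) (x :: t)) = x :: t.takeWhile (· == x) := by
        simp
      simp only [snLoop, habs]
      rw [if_neg (by omega)]
      have hmin : (if x - q ≠ x - q then x else min x nearest) = nearest := by
        simp [min_eq_right hnb]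
      rw [hmin, ih (i + 1) nearest hp.of_cons (fun y hy => List.rel_of_pairwise_cons hp hy) hqb hnb,
        htw]
      simp only [List.length_cons, Prod.mk.injEq, true_and]
      push_cast; ring

-- the strictly-descending phase of the scan: elements < q never break and each becomes
-- the running nearest
theorem snLoop_desc (q : Int) : ∀ (l : List Int) (a : Int) (i : Int) (r : List Int),
    (a :: l).Pairwise (· ≤ ·) → (∀ x ∈ a :: l, x < q) →
    snLoop q (l ++ r) (i + 1) (some (q - a)) a i
      = snLoop q r (i + l.length + 1) (some (q - (a :: l).getLast (by simp)))
          ((a :: l).getLast (by simp)) (i + l.length) := by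
  intro l
  induction l with
  | nil => intro a i r _ _; simp
  | cons x l' ih =>
    intro a i r hp hlt
    have hax : a ≤ x := List.rel_of_pairwise_cons hp (by simp)
    have hxq : x < q := hlt x (by simp)
    have habs : |q - x| = q - x := abs_of_nonneg (by omega)
    simp only [List.cons_append, snLoop, habs]
    rw [if_neg (by omega)]
    have hne : (if q - x ≠ q - a then x else min x a) = x := by
      by_cases h : x = a
      · subst h; simp
      · rw [if_pos (by omega)]
    rw [hne, ih x (i + 1) r hp.of_cons (fun y hy => hlt y (by simp [hy]))]
    have hgl : (x :: l').getLast (by simp) = (a :: x :: l').getLast (by simp) :=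
      (List.getLast_cons (by simp)).symm
    rw [hgl]
    congr 1 <;> (simp only [List.length_cons]; push_cast; ring)

theorem dropWhile_lower (q : Int) : ∀ (ys : List Int), ys.Pairwise (· ≤ ·) →
    ∀ x ∈ ys.dropWhile (fun y => decide (y < q)), q ≤ x := by
  intro ys
  induction ys with
  | nil => simp
  | cons y t ih =>
    intro hp x hx
    by_cases hyq : y < q
    · rw [List.dropWhile_cons_of_pos (by simpa using hyq)] at hx
      exact ih hp.of_cons x hx
    · rw [List.dropWhile_cons_of_neg (by simpa using hyq)] at hx
      rcases List.mem_cons.mp hx with h | h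
      · omega
      · have := List.rel_of_pairwise_cons hp h; omega

theorem dropWhile_gt (b : Int) : ∀ (r' : List Int), r'.Pairwise (· ≤ ·) →
    (∀ x ∈ r', b ≤ x) → ∀ x ∈ r'.dropWhile (· == b), b < x := by
  intro r'
  induction r' with
  | nil => simp
  | cons y t ih =>
    intro hp hlb x hx
    by_cases hyb : y = b
    · rw [List.dropWhile_cons_of_pos (by simp [hyb])] at hx
      exact ih hp.of_cons (fun z hz => List.rel_of_pairwise_cons hp hz |>.trans' (by simp [hyb])) x hx
    · rw [List.dropWhile_cons_of_neg (by simp [hyb])] at hx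
      have hby : b ≤ y := hlb y (by simp)
      rcases List.mem_cons.mp hx with h | h
      · omega
      · have := List.rel_of_pairwise_cons hp h; omega

theorem bisectLeft_split (v : Int) (P S : List Int) (hs : (P ++ S).Pairwise (· ≤ ·))
    (hP : ∀ x ∈ P, x < v) (hS : ∀ x ∈ S, v ≤ x) :
    PySem.List.bisectLeft (P ++ S) v = P.length := by
  obtain ⟨hle, hlt, hge⟩ := PySem.List.bisectLeft_spec (P ++ S) v hs
  set k := PySem.List.bisectLeft (P ++ S) v with hk
  rcases lt_trichotomy k P.length with h | h | h
  · exfalso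
    have hkl : k < (P ++ S).length := by simp; omega
    have h1 := hge k hkl le_rfl
    have h2 : (P ++ S)[k] = P[k]'(by omega) := List.getElem_append_left (by omega)
    have h3 := hP (P[k]'(by omega)) (List.getElem_mem _)
    omega
  · exact h
  · exfalso
    have hpl : P.length < (P ++ S).length := by simp at hle ⊢; omega
    have h1 := hlt P.length hpl h
    have h2 : (P ++ S)[P.length] = S[0]'(by simp at hpl ⊢; omega) := by
      rw [List.getElem_append_right le_rfl]; simp
    have h3 := hS (S[0]'(by simp at hpl ⊢; omega)) (List.getElem_mem _)
    omega

theorem bisectRight_split (v : Int) (P S : List Int) (hs : (P ++ S).Pairwise (· ≤ ·))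
    (hP : ∀ x ∈ P, x ≤ v) (hS : ∀ x ∈ S, v < x) :
    PySem.List.bisectRight (P ++ S) v = P.length := by
  obtain ⟨hle, hlt, hge⟩ := PySem.List.bisectRight_spec (P ++ S) v hs
  set k := PySem.List.bisectRight (P ++ S) v with hk
  rcases lt_trichotomy k P.length with h | h | h
  · exfalso
    have hkl : k < (P ++ S).length := by simp; omega
    have h1 := hge k hkl le_rfl
    have h2 : (P ++ S)[k] = P[k]'(by omega) := List.getElem_append_left (by omega)
    have h3 := hP (P[k]'(by omega)) (List.getElem_mem _)
    omega
  · exact h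
  · exfalso
    have hpl : P.length < (P ++ S).length := by simp at hle ⊢; omega
    have h1 := hlt P.length hpl h
    have h2 : (P ++ S)[P.length] = S[0]'(by simp at hpl ⊢; omega) := by
      rw [List.getElem_append_right le_rfl]; simp
    have h3 := hS (S[0]'(by simp at hpl ⊢; omega)) (List.getElem_mem _)
    omega

theorem le_getLast_of_pairwise : ∀ (ys : List Int) (h : ys ≠ []), ys.Pairwise (· ≤ ·) →
    ∀ x ∈ ys, x ≤ ys.getLast h := by
  intro ys
  induction ys with
  | nil => simp
  | cons y t ih =>
    intro _ hp x hx
    rcases List.mem_cons.mp hx with h | h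
    · subst h
      cases t with
      | nil => simp
      | cons z t' =>
        rw [List.getLast_cons (by simp)]
        exact (List.rel_of_pairwise_cons hp (List.getLast_mem _)).trans' le_rfl
    · have hne : t ≠ [] := by rintro rfl; simp at h
      rw [List.getLast_cons hne]
      exact ih hne hp.of_cons x h

-- all elements of b :: takeWhile (== b) r' are b
theorem mem_plateau_eq (b : Int) (twl : List Int) (htwl : ∀ x ∈ twl, x = b) :
    ∀ x ∈ b :: twl, x = b := by
  intro x hx
  rcases List.mem_cons.mp hx with h | h
  · exact h
  · exact htwl x h

theorem mem_takeWhile_eq (b : Int) (r' : List Int) :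
    ∀ x ∈ r'.takeWhile (· == b), x = b := fun _ hx => by
  simpa using List.mem_takeWhile_imp hx

theorem getD_append_last (L R : List Int) (h : L ≠ []) :
    (L ++ R).getD (L.length - 1) 0 = L.getLast h := by
  have hl : 0 < L.length := List.length_pos_of_ne_nil h
  rw [List.getD_eq_getElem _ _ (by simp; omega),
    List.getElem_append_left (by omega), List.getLast_eq_getElem]

theorem getD_append_head (L : List Int) (b : Int) (r' : List Int) :
    (L ++ b :: r').getD L.length 0 = b := by
  rw [List.getD_eq_getElem _ _ (by simp), List.getElem_append_right le_rfl]
  simp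

-- the per-query step: A's linear scan over the window = B's bisect computation,
-- and the new offset is again a Nat below ds.length
theorem step_eq (ds : List Int) (q : Int) (off : Nat) (acc : List Int)
    (hs : ds.Pairwise (· ≤ ·)) (hoff : off < ds.length) :
    solveBody ds (acc, ((off : Nat) : Int)) q = stepB ds (acc, ((off : Nat) : Int)) q
    ∧ ∃ off' : Nat, (stepB ds (acc, ((off : Nat) : Int)) q).2 = ((off' : Nat) : Int)
        ∧ off' < ds.length := by
  have hslice : PySem.List.slice ds (some ((off : Nat) : Int)) none = ds.drop off :=
    PySem.List.slice_from_natCast ds off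
  have hpys : (ds.drop off).Pairwise (· ≤ ·) := hs.drop
  have hysle : (ds.drop off).length ≤ ds.length := by
    rw [List.length_drop]; omega
  have hysne : (ds.drop off).length ≠ 0 := by
    rw [List.length_drop]; omega
  have hLR : (ds.drop off).takeWhile (fun y => decide (y < q))
      ++ (ds.drop off).dropWhile (fun y => decide (y < q)) = ds.drop off :=
    List.takeWhile_append_dropWhile
  have hLlt : ∀ x ∈ (ds.drop off).takeWhile (fun y => decide (y < q)), x < q := by
    intro x hx; simpa using List.mem_takeWhile_imp hx
  have hRge : ∀ x ∈ (ds.drop off).dropWhile (fun y => decide (y < q)), q ≤ x :=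
    dropWhile_lower q (ds.drop off) hpys
  have hbL : PySem.List.bisectLeft (ds.drop off) q
      = ((ds.drop off).takeWhile (fun y => decide (y < q))).length := by
    conv_lhs => rw [← hLR]
    exact bisectLeft_split q _ _ (by rw [hLR]; exact hpys) hLlt hRge
  simp only [solveBody, search_nearest, stepB, hslice]
  generalize hgen : ds.drop off = ys at hpys hysle hysne hLR hLlt hRge hbL ⊢
  clear hgen hslice
  generalize hLg : ys.takeWhile (fun y => decide (y < q)) = L at hLR hLlt hbL
  generalize hRg : ys.dropWhile (fun y => decide (y < q)) = R at hLR hRge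
  clear hLg hRg
  subst hLR
  obtain ⟨hpL, hpR, hcrs⟩ := List.pairwise_append.mp hpys
  rw [hbL]
  cases L with
  | nil =>
    cases R with
    | nil => simp at hysne
    | cons b r' =>
      have hqb : q ≤ b := hRge b List.mem_cons_self
      have hbr' : ∀ x ∈ r', b ≤ x := fun x hx => List.rel_of_pairwise_cons hpys hx
      have habs : |q - b| = b - q := by rw [abs_sub_comm]; exact abs_of_nonneg (by omega)
      have hA : snLoop q ([] ++ b :: r') 0 none (([] ++ b :: r').headD 0) 0
          = (b, 0 + ((r'.takeWhile (· == b)).length : Int)) := by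
        simp only [List.nil_append, snLoop, List.headD_cons, habs]
        exact snLoop_dup q b r' 0 b hpys.of_cons hbr' hqb le_rfl
      have hdec2 : (b :: r'.takeWhile (· == b)) ++ r'.dropWhile (· == b) = b :: r' := by
        rw [List.cons_append, List.takeWhile_append_dropWhile]
      have hbR : PySem.List.bisectRight (b :: r') b = (r'.takeWhile (· == b)).length + 1 := by
        conv_lhs => rw [← hdec2]
        rw [bisectRight_split b _ _ (by rw [hdec2]; exact hpys) ?_ ?_]
        · simp
        · intro x hx
          have := mem_plateau_eq b _ (mem_takeWhile_eq b r') x hx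
          omega
        · exact dropWhile_gt b r' hpys.of_cons hbr'
      have htwlen : (r'.takeWhile (· == b)).length ≤ r'.length :=
        (List.takeWhile_sublist _).length_le
      rw [hA]
      split_ifs with h
      · exfalso
        rcases h with h | h
        · simp at h
        · simp at h
      · simp only [List.nil_append, List.getD_cons_zero, List.length_nil] at h ⊢
        rw [habs, show q + (b - q) = b by ring, hbR]
        refine ⟨by simp, (r'.takeWhile (· == b)).length, by push_cast; ring, ?_⟩
        simp only [List.nil_append, List.length_cons] at hysle
        omega
  | cons a0 l' =>
    have haLmem : (a0 :: l').getLast (by simp) ∈ a0 :: l' := List.getLast_mem _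
    have haLq : (a0 :: l').getLast (by simp) < q := hLlt _ haLmem
    have hallL : ∀ x ∈ a0 :: l', x ≤ (a0 :: l').getLast (by simp) :=
      le_getLast_of_pairwise (a0 :: l') (by simp) hpL
    have ha0q : a0 < q := hLlt a0 List.mem_cons_self
    have habs0 : |q - a0| = q - a0 := abs_of_nonneg (by omega)
    have hgdaL : ((a0 :: l') ++ R).getD ((a0 :: l').length - 1) 0
        = (a0 :: l').getLast (by simp) := getD_append_last _ R (by simp)
    have habsL : |q - (a0 :: l').getLast (by simp)| = q - (a0 :: l').getLast (by simp) :=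
      abs_of_nonneg (by omega)
    cases R with
    | nil =>
      -- window is all < q: B takes the last element, A walks to the end
      have hA : snLoop q ((a0 :: l') ++ []) 0 none (((a0 :: l') ++ []).headD 0) 0
          = ((a0 :: l').getLast (by simp), (0 : Int) + l'.length) := by
        conv_lhs => rw [show (a0 :: l') ++ ([] : List Int) = a0 :: (l' ++ []) by simp]
        simp only [snLoop, habs0]
        rw [snLoop_desc q l' a0 0 [] hpL hLlt]
        simp [snLoop]
      have hbR : PySem.List.bisectRight ((a0 :: l') ++ [])
          (q + (q - (a0 :: l').getLast (by simp))) = l'.length + 1 := by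
        rw [bisectRight_split _ _ ([] : List Int)
          (by rw [List.append_nil]; exact hpL)
          (fun x hx => by have h1 := hLlt x hx; omega)
          (by simp)]
        simp
      rw [hA]
      split_ifs with h
      · rw [hgdaL, habsL, hbR]
        refine ⟨by simp, l'.length, by push_cast; ring, ?_⟩
        simp only [List.append_nil, List.length_cons] at hysle
        omega
      · exfalso
        apply h; left; simp
    | cons b r' =>
      have hqb : q ≤ b := hRge b List.mem_cons_self
      have hbr' : ∀ x ∈ r', b ≤ x := fun x hx => List.rel_of_pairwise_cons hpR hx
      have habsb : |q - b| = b - q := by rw [abs_sub_comm]; exact abs_of_nonneg (by omega)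
      have hgdb : ((a0 :: l') ++ (b :: r')).getD (a0 :: l').length 0 = b :=
        getD_append_head _ b r'
      have htwlen : (r'.takeWhile (· == b)).length ≤ r'.length :=
        (List.takeWhile_sublist _).length_le
      have hlen : (l'.length + 1) + (r'.length + 1) ≤ ds.length := by
        simp only [List.length_append, List.length_cons] at hysle; omega
      -- A side: descending phase ends at the last left element
      have hA0 : snLoop q ((a0 :: l') ++ (b :: r')) 0 none
            (((a0 :: l') ++ (b :: r')).headD 0) 0
          = snLoop q (b :: r') (0 + (l'.length : Int) + 1)
              (some (q - (a0 :: l').getLast (by simp))) ((a0 :: l').getLast (by simp))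
              (0 + (l'.length : Int)) := by
        simp only [List.cons_append, List.headD_cons, snLoop, habs0]
        exact snLoop_desc q l' a0 0 (b :: r') hpL hLlt
      -- plateau facts
      have hdec2 : ((a0 :: l') ++ (b :: r'.takeWhile (· == b))) ++ r'.dropWhile (· == b)
          = (a0 :: l') ++ (b :: r') := by
        rw [List.append_assoc]
        simp [List.takeWhile_append_dropWhile]
      have hbRb : PySem.List.bisectRight ((a0 :: l') ++ (b :: r')) b
          = l'.length + 1 + ((r'.takeWhile (· == b)).length + 1) := by
        conv_lhs => rw [← hdec2]
        rw [bisectRight_split b _ _ (by rw [hdec2]; exact hpys) ?_ ?_]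
        · simp only [List.length_append, List.length_cons]
          try omega
        · intro x hx
          rcases List.mem_append.mp hx with h | h
          · have := hLlt x h; omega
          · have := mem_plateau_eq b _ (mem_takeWhile_eq b r') x h; omega
        · exact dropWhile_gt b r' hpR.of_cons hbr'
      rw [hA0, hgdaL, hgdb]
      by_cases hda : q - (a0 :: l').getLast (by simp) ≤ b - q
      · -- B takes the left neighbour (tie included)
        rw [if_pos (Or.inr ⟨by simp, hda⟩), habsL]
        simp only [snLoop, habsb]
        by_cases hcmp : q - (a0 :: l').getLast (by simp) < b - q
        · -- left strictly nearer: A breaks at b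
          rw [if_pos hcmp]
          have hbRa : PySem.List.bisectRight ((a0 :: l') ++ (b :: r'))
              (q + (q - (a0 :: l').getLast (by simp))) = l'.length + 1 := by
            rw [bisectRight_split _ _ _ hpys
              (fun x hx => by have := hLlt x hx; omega)
              (fun x hx => by
                have hbx : b ≤ x := by
                  rcases List.mem_cons.mp hx with h | h
                  · omega
                  · have := hbr' x h; omega
                omega)]
            simp
          rw [hbRa]
          refine ⟨?_, l'.length, by push_cast; ring, by omega⟩
          simp only [Prod.mk.injEq, true_and]
          push_cast; ring
        · -- tie: A walks the b-plateau keeping the smaller digit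
          rw [if_neg hcmp,
            if_neg (show ¬ (b - q ≠ q - (a0 :: l').getLast (by simp)) by omega),
            min_eq_right (show (a0 :: l').getLast (by simp) ≤ b by omega),
            snLoop_dup q b r' (0 + (l'.length : Int) + 1) _ hpR.of_cons hbr' hqb (by omega),
            show q + (q - (a0 :: l').getLast (by simp)) = b by omega, hbRb]
          refine ⟨?_, l'.length + 1 + (r'.takeWhile (· == b)).length, by push_cast; ring,
            by omega⟩
          simp only [Prod.mk.injEq, true_and]
          push_cast; ring
      · -- B takes the right neighbour: db < da, A moves to b and walks its plateau
        have hBneg : ¬ ((a0 :: l').length = ((a0 :: l') ++ b :: r').length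
            ∨ (0 < (a0 :: l').length
              ∧ q - (a0 :: l').getLast (by simp) ≤ b - q)) := by
          rintro (hc | hc)
          · simp only [List.length_append, List.length_cons] at hc; omega
          · exact hda hc.2
        rw [if_neg hBneg, habsb]
        simp only [snLoop, habsb]
        rw [if_neg (show ¬ (q - (a0 :: l').getLast (by simp) < b - q) by omega),
          if_pos (show b - q ≠ q - (a0 :: l').getLast (by simp) by omega),
          snLoop_dup q b r' (0 + (l'.length : Int) + 1) _ hpR.of_cons hbr' hqb le_rfl,
          show q + (b - q) = b by ring, hbRb]
        refine ⟨?_, l'.length + 1 + (r'.takeWhile (· == b)).length, by push_cast; ring,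
          by omega⟩
        simp only [Prod.mk.injEq, true_and]
        push_cast; ring

-- the query loop: equal states stay equal
theorem fold_eq (ds : List Int) (hs : ds.Pairwise (· ≤ ·)) :
    ∀ (qs : List Int) (acc : List Int) (off : Nat), off < ds.length →
    (qs.foldl (solveBody ds) (acc, ((off : Nat) : Int))).1
      = (qs.foldl (stepB ds) (acc, ((off : Nat) : Int))).1 := by
  intro qs
  induction qs with
  | nil => intro acc off _; rfl
  | cons q qs ih =>
    intro acc off h
    obtain ⟨h1, off', h2, h3⟩ := step_eq ds q off acc hs h
    simp only [List.foldl_cons, h1]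
    have := ih (stepB ds (acc, ((off : Nat) : Int)) q).1 off' h3
    rw [← h2] at this
    simpa using this

-- ===== VERDICT (by name: the statement is the Claim_ definition above) =====
theorem solve_spec : Claim_equal_solve := by
  intro digits looking_digits _ hpre
  simp only [Spec_solve, solve, solve_alt]
  rcases hpre with hne | hnil
  · have hds : PySem.List.sorted digits (fun x => x) false ≠ [] := by
      simpa [PySem.List.sorted_eq_nil_iff] using hne
    have hlen : 0 < (PySem.List.sorted digits (fun x => x) false).length :=
      List.length_pos_of_ne_nil hds
    have hp : (PySem.List.sorted digits (fun x => x) false).Pairwise (· ≤ ·) :=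
      PySem.List.sorted_pairwise digits (fun x => x)
    simpa using fold_eq _ hp looking_digits [] 0 hlen
  · subst hnil; rfl
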